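-- pv_equiv track=rewrite | github.com/Omnicode786/Cis-2024-Muzammil | DSATsks/lab5/actual/task1.py | retrieveTriangular
-- ===== SOURCE A (Python) =====
-- def retrieveTriangular(U, n):
--     A = [[0]*n for _ in range(n)]
--     for j in range(n):
--         for k in range(n):
--             if k <= j:
--              idx = (j*(j+1))//2 + k
--              A[j][k] = U[idx]
--             else:
--                 A[j][k] = 0
--     return A
-- ===== SOURCE B (Python) =====
-- def retrieveTriangular(U, n):
--     # Each row j is the contiguous block U[j(j+1)//2 : j(j+1)//2 + j+1],
--     # padded with zeros to width n. No nested index loops, no conditional.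
--     rows = []
--     for j in range(n):
--         s = j * (j + 1) // 2
--         rows.append(U[s:s + j + 1] + [0] * (n - j - 1))
--     return rows
-- ===== Notes on version B (the rewrite author's own statement) =====
-- stated objective: simpler
-- what changed: Instead of preallocating an n x n zero matrix and filling every cell through a nested loop with a k<=j branch, B builds each row directly as the contiguous slice of U for that row plus zero padding, with no inner index loop and no conditional.
import Mathlib
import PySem

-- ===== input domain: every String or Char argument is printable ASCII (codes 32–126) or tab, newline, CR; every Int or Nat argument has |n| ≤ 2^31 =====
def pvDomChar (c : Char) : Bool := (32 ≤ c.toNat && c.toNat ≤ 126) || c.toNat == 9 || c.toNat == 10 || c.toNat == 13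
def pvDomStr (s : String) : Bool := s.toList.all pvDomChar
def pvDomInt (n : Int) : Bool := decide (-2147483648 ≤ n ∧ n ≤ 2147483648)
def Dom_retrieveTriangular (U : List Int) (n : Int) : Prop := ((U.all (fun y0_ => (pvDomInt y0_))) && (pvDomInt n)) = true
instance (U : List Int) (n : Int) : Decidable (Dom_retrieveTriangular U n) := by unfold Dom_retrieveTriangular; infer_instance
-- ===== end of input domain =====

-- B builds each row directly as the contiguous slice of U plus zero padding (simpler: no
-- preallocated matrix, no inner index loop, no k<=j branch); equal to A wherever A returns.


-- ===== PORT A =====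
-- A[j][k] = v  (j, k are in-range non-negative indices in every reachable call, so
-- List.modify/List.set at the Nat index is exact Python list assignment)
def pvSet2 (A : List (List Int)) (j k : Nat) (v : Int) : List (List Int) :=
  A.modify j (fun row => row.set k v)

-- literal port of A: build [[0]*n]*n, then the two nested for-loops with the k<=j branch;
-- U[idx] is PySem.List.pyGet? (none = IndexError, excluded by Pre_; .getD 0 is unreachable there)
def retrieveTriangular (U : List Int) (n : Int) : List (List Int) :=
  (PySem.List.pyRange 0 n 1).foldl (fun A j =>
    (PySem.List.pyRange 0 n 1).foldl (fun A k =>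
      if k ≤ j then
        pvSet2 A j.toNat k.toNat
          ((PySem.List.pyGet? U (PySem.Int.floordiv (j * (j + 1)) 2 + k)).getD 0)
      else
        pvSet2 A j.toNat k.toNat 0) A)
    ((PySem.List.pyRange 0 n 1).map (fun _ => (PySem.List.pyRange 0 n 1).map (fun _ => (0 : Int))))

-- ===== PORT B =====
-- literal port of Source B: row j is U[s:s+j+1] + [0]*(n-j-1), appended row by row
def retrieveTriangular_alt (U : List Int) (n : Int) : List (List Int) :=
  (PySem.List.pyRange 0 n 1).foldl (fun rows j =>
    let s := PySem.Int.floordiv (j * (j + 1)) 2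
    rows ++ [PySem.List.slice U (some s) (some (s + j + 1)) ++
             List.replicate (n - j - 1).toNat (0 : Int)]) []

-- ===== PRECONDITION & SPEC =====
-- Pre_ excludes exactly the inputs where A raises IndexError: n > 0 with U shorter than the
-- n-th triangular number n*(n+1)//2 (B's slice would silently truncate there).
def Pre_retrieveTriangular (U : List Int) (n : Int) : Prop :=
  n ≤ 0 ∨ n * (n + 1) ≤ 2 * (U.length : Int)
instance (U : List Int) (n : Int) : Decidable (Pre_retrieveTriangular U n) := by
  unfold Pre_retrieveTriangular; infer_instance

def pvWitness_retrieveTriangular : List Int × Int := ([1, 2, 3], 2)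

def Spec_retrieveTriangular (U : List Int) (n : Int) (out : List (List Int)) : Prop :=
  out = retrieveTriangular_alt U n
instance (U : List Int) (n : Int) (out : List (List Int)) :
    Decidable (Spec_retrieveTriangular U n out) := by unfold Spec_retrieveTriangular; infer_instance

-- ===== CLAIM (what is proved, stated in full; the proofs are below) =====
def Claim_equal_retrieveTriangular : Prop :=
  ∀ (U : List Int) (n : Int), Dom_retrieveTriangular U n → Pre_retrieveTriangular U n →
    Spec_retrieveTriangular U n (retrieveTriangular U n)

-- ===== LEMMAS AND PROOFS =====

-- Nat triangular number
def triN (j : Nat) : Nat := j * (j + 1) / 2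

theorem triN_succ (j : Nat) : triN (j + 1) = triN j + (j + 1) := by
  unfold triN
  have h : (j + 1) * (j + 1 + 1) = j * (j + 1) + (j + 1) * 2 := by ring
  rw [h, Nat.add_mul_div_right _ _ (by omega : 0 < 2)]

theorem triN_mono {j m : Nat} (h : j ≤ m) : triN j ≤ triN m :=
  Nat.div_le_div_right (Nat.mul_le_mul h (by omega))

-- the value A writes into cell (j,k)
def pvVal (U : List Int) (j k : Nat) : Int :=
  if k ≤ j then (PySem.List.pyGet? U ((triN j + k : Nat) : Int)).getD 0 else 0

-- fold of modifies at a fixed row = one modify with the folded row function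
theorem foldl_modify_row (ks : List Nat) (t : Nat) (g : List Int → Nat → List Int) :
    ∀ (M : List (List Int)),
      ks.foldl (fun A k => A.modify t (fun row => g row k)) M
        = M.modify t (fun row => ks.foldl g row) := by
  induction ks with
  | nil => intro M; exact (List.modify_id t M).symm
  | cons k ks ih =>
      intro M
      simp only [List.foldl_cons, ih, List.modify_modify_eq]
      rfl

-- modify one entry of a map over range
theorem modify_map_range {α : Type} (m t : Nat) (f : Nat → α) (φ : α → α) (_ht : t < m) :
    ((List.range m).map f).modify t φ
      = (List.range m).map (fun j => if j = t then φ (f t) else f j) := by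
  apply List.ext_getElem
  · simp
  · intro i h1 h2
    simp only [List.getElem_modify, List.getElem_map, List.getElem_range] at *
    by_cases h : t = i
    · subst h; simp
    · rw [if_neg h, if_neg (fun hh => h hh.symm)]

-- the outer loop: each iteration j rewrites exactly row j
theorem foldl_modify_distinct (m : Nat) (h : Nat → List Int → List Int)
    (g : Nat → List Int) :
    ∀ t, t ≤ m →
      (List.range t).foldl (fun A j => A.modify j (h j)) ((List.range m).map g)
        = (List.range m).map (fun j => if j < t then h j (g j) else g j) := by
  intro t
  induction t with
  | zero => intro _; simp
  | succ t ih =>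
      intro hle
      rw [List.range_succ, List.foldl_append, ih (by omega)]
      simp only [List.foldl_cons, List.foldl_nil]
      rw [modify_map_range m t _ _ (by omega)]
      apply List.map_congr_left
      intro j hj
      by_cases hjt : j = t
      · subst hjt; simp
      · by_cases hlt : j < t <;> simp [hjt, hlt] <;> omega

-- folding sets over range preserves length
theorem length_foldl_set (v : Nat → Int) (ks : List Nat) :
    ∀ (row : List Int), (ks.foldl (fun r k => r.set k (v k)) row).length = row.length := by
  induction ks with
  | nil => intro row; rfl
  | cons k ks ih => intro row; simp [List.foldl_cons, ih]

-- entries after folding sets over range t (t within bounds)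
theorem getElem?_foldl_set_range (v : Nat → Int) (row : List Int) (t : Nat)
    (_ht : t ≤ row.length) (i : Nat) :
    ((List.range t).foldl (fun r k => r.set k (v k)) row)[i]?
      = if i < t then some (v i) else row[i]? := by
  induction t with
  | zero => simp
  | succ t ih =>
      rw [List.range_succ, List.foldl_append]
      simp only [List.foldl_cons, List.foldl_nil]
      rw [List.getElem?_set]
      have hlen : ((List.range t).foldl (fun r k => r.set k (v k)) row).length = row.length :=
        length_foldl_set v _ row
      rw [ih (by omega)]
      by_cases h : t = i
      · subst h; simp [hlen]; omega
      · by_cases h2 : i < t <;> simp [h, h2] <;> omega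

-- arithmetic: the last index of row j is in range
theorem row_block_le {j m L : Nat} (hj : j < m) (hL : m * (m + 1) ≤ 2 * L) :
    triN j + (j + 1) ≤ L := by
  have h1 : triN j + (j + 1) = triN (j + 1) := (triN_succ j).symm
  have h2 : triN (j + 1) ≤ triN m := triN_mono (by omega)
  have h3 : triN m ≤ L := by
    unfold triN
    calc m * (m + 1) / 2 ≤ 2 * L / 2 := Nat.div_le_div_right hL
    _ = L := by omega
  omega

-- THE ROW LEMMA: A's inner loop on a zero row produces B's row
theorem row_eq (U : List Int) (m j : Nat) (hj : j < m)
    (hL : m * (m + 1) ≤ 2 * U.length) :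
    (List.range m).foldl (fun row k => row.set k (pvVal U j k)) (List.replicate m (0 : Int))
      = (U.drop (triN j)).take (j + 1) ++ List.replicate (m - j - 1) (0 : Int) := by
  have hblock := row_block_le hj hL
  have hlen1 : ((U.drop (triN j)).take (j + 1)).length = j + 1 := by
    simp [List.length_take, List.length_drop]; omega
  apply List.ext_getElem?
  intro i
  rw [getElem?_foldl_set_range _ _ _ (by simp)]
  by_cases hi : i < m
  · by_cases hij : i ≤ j
    · have hleft : i < ((U.drop (triN j)).take (j + 1)).length := by omega
      rw [List.getElem?_append_left hleft]
      have hu : triN j + i < U.length := by omega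
      simp only [hi, if_pos]
      rw [List.getElem?_take_of_lt (by omega), List.getElem?_drop]
      rw [List.getElem?_eq_getElem hu]
      simp only [pvVal, hij, if_pos]
      rw [PySem.List.pyGet?_natCast, List.getElem?_eq_getElem hu, Option.getD_some]
    · rw [List.getElem?_append_right (by omega)]
      simp only [hi, if_pos]
      rw [hlen1, List.getElem?_replicate]
      simp [pvVal, hij]; omega
  · rw [if_neg hi,
        List.getElem?_eq_none_iff.mpr (by simp; omega),
        List.getElem?_eq_none_iff.mpr (by simp [hlen1]; omega)]

-- cast helpers for the Python index arithmetic
theorem tri_cast (j : Nat) :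
    PySem.Int.floordiv ((j : Int) * ((j : Int) + 1)) 2 = ((triN j : Nat) : Int) := by
  have h : ((j : Int) * ((j : Int) + 1)) = ((j * (j + 1) : Nat) : Int) := by push_cast; ring
  rw [h]
  exact_mod_cast PySem.Int.floordiv_natCast (j * (j + 1)) 2

theorem idx_cast (j k : Nat) :
    PySem.Int.floordiv ((j : Int) * ((j : Int) + 1)) 2 + (k : Int)
      = ((triN j + k : Nat) : Int) := by
  rw [tri_cast]; push_cast; ring

theorem foldl_append_singleton {α β : Type} (f : α → β) (l : List α) :
    ∀ (init : List β), l.foldl (fun acc x => acc ++ [f x]) init = init ++ l.map f := by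
  induction l with
  | nil => intro init; simp
  | cons a l ih => intro init; simp [ih]

-- A's loops in closed form
theorem A_closed (U : List Int) (m : Nat) (hL : m * (m + 1) ≤ 2 * U.length) :
    retrieveTriangular U ((m : Nat) : Int)
      = (List.range m).map (fun j =>
          (U.drop (triN j)).take (j + 1) ++ List.replicate (m - j - 1) (0 : Int)) := by
  unfold retrieveTriangular
  rw [PySem.List.pyRange_zero_natCast, List.foldl_map]
  have hinit : ((List.range m).map (fun k : Nat => (k : Int))).map
        (fun _ => ((List.range m).map (fun k : Nat => (k : Int))).map (fun _ => (0 : Int)))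
      = (List.range m).map (fun _ => List.replicate m (0 : Int)) := by
    rw [List.map_map]
    apply List.map_congr_left
    intro _ _
    simp only [Function.comp_apply]
    rw [List.map_map,
        show ((fun _ => (0 : Int)) ∘ fun k : Nat => (k : Int)) = fun _ : Nat => (0 : Int) from rfl,
        List.map_const', List.length_range]
  have hbody : (fun (A : List (List Int)) (j : Nat) =>
        (((List.range m).map (fun k : Nat => (k : Int))).foldl (fun A k =>
          if k ≤ ((j : Nat) : Int) then
            pvSet2 A ((j : Nat) : Int).toNat k.toNat
              ((PySem.List.pyGet? U
                (PySem.Int.floordiv (((j : Nat) : Int) * (((j : Nat) : Int) + 1)) 2 + k)).getD 0)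
          else pvSet2 A ((j : Nat) : Int).toNat k.toNat 0) A))
      = (fun (A : List (List Int)) (j : Nat) =>
          A.modify j (fun row =>
            (List.range m).foldl (fun row k => row.set k (pvVal U j k)) row)) := by
    funext A j
    rw [List.foldl_map]
    have hstep : (fun (A : List (List Int)) (k : Nat) =>
          if ((k : Nat) : Int) ≤ ((j : Nat) : Int) then
            pvSet2 A ((j : Nat) : Int).toNat ((k : Nat) : Int).toNat
              ((PySem.List.pyGet? U
                (PySem.Int.floordiv (((j : Nat) : Int) * (((j : Nat) : Int) + 1)) 2
                  + ((k : Nat) : Int))).getD 0)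
          else pvSet2 A ((j : Nat) : Int).toNat ((k : Nat) : Int).toNat 0)
        = (fun (A : List (List Int)) (k : Nat) =>
            A.modify j (fun row => row.set k (pvVal U j k))) := by
      funext A k
      rw [idx_cast]
      simp only [Int.toNat_natCast, Nat.cast_le, pvSet2, pvVal]
      by_cases h : k ≤ j <;> simp [h]
    rw [hstep, foldl_modify_row]
  rw [hinit, hbody, foldl_modify_distinct m _ _ m le_rfl]
  apply List.map_congr_left
  intro j hj
  have hj' : j < m := List.mem_range.mp hj
  rw [if_pos hj', row_eq U m j hj' hL]

-- B's loop in closed form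
theorem B_closed (U : List Int) (m : Nat) :
    retrieveTriangular_alt U ((m : Nat) : Int)
      = (List.range m).map (fun j =>
          (U.drop (triN j)).take (j + 1) ++ List.replicate (m - j - 1) (0 : Int)) := by
  unfold retrieveTriangular_alt
  rw [PySem.List.pyRange_zero_natCast, List.foldl_map]
  have hb : (fun (rows : List (List Int)) (j : Nat) =>
        (fun (rows : List (List Int)) (j : Int) =>
          let s := PySem.Int.floordiv (j * (j + 1)) 2
          rows ++ [PySem.List.slice U (some s) (some (s + j + 1)) ++
                   List.replicate (((m : Nat) : Int) - j - 1).toNat (0 : Int)]) rows (j : Int))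
      = (fun (rows : List (List Int)) (j : Nat) =>
          rows ++ [PySem.List.slice U (some ((triN j : Nat) : Int))
                    (some (((triN j : Nat) : Int) + (j : Int) + 1)) ++
                   List.replicate (((m : Nat) : Int) - (j : Int) - 1).toNat (0 : Int)]) := by
    funext rows j
    simp only [tri_cast]
  rw [hb, foldl_append_singleton]
  rw [List.nil_append]
  apply List.map_congr_left
  intro j hj
  have hj' : j < m := List.mem_range.mp hj
  have hsl : PySem.List.slice U (some ((triN j : Nat) : Int))
      (some (((triN j : Nat) : Int) + (j : Int) + 1)) = (U.drop (triN j)).take (j + 1) := by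
    have h : ((triN j : Nat) : Int) + (j : Int) + 1
        = ((triN j : Nat) : Int) + ((j + 1 : Nat) : Int) := by push_cast; ring
    rw [h, PySem.List.slice_natCast_add]
  rw [hsl]
  have hrep : (((m : Nat) : Int) - (j : Int) - 1).toNat = m - j - 1 := by omega
  rw [hrep]

-- ===== VERDICT (by name: the statement is the Claim_ definition above) =====
theorem retrieveTriangular_spec : Claim_equal_retrieveTriangular := by
  intro U n _ hpre
  unfold Spec_retrieveTriangular
  by_cases hn : n ≤ 0
  · unfold retrieveTriangular retrieveTriangular_alt
    rw [PySem.List.pyRange_one_eq_nil hn]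
    simp
  · obtain ⟨m, rfl⟩ : ∃ m : Nat, n = ((m : Nat) : Int) :=
      ⟨n.toNat, (Int.toNat_of_nonneg (by omega)).symm⟩
    have hL : m * (m + 1) ≤ 2 * U.length := by
      rcases hpre with h | h
      · exact absurd h hn
      · exact_mod_cast h
    rw [A_closed U m hL, B_closed U m]
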